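-- pv_equiv track=rewrite | github.com/anantgupta30/JCB-Diggers | A2/q2/forest_fire.py | smart_pad_selected
-- ===== SOURCE A (Python) =====
-- def get_one_hop_sources(adj, seeds):
--     one_hop = set()
--     adj_get = adj.get
--     one_hop_add = one_hop.add
--     empty = ()
--     for seed in seeds:
--         for v, _ in adj_get(seed, empty):
--             if v not in seeds:
--                 one_hop_add(v)
--     return one_hop
--
-- def extend_with_source_priority(selected, selected_set, k, adjs, source_set):
--     for graph_adj in adjs:
--         for u, nbrs in graph_adj.items():
--             if u not in source_set:
--                 continue
--             for v, _ in nbrs: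
--                 edge = (u, v)
--                 if edge in selected_set:
--                     continue
--                 selected.append(edge)
--                 selected_set.add(edge)
--                 if len(selected) >= k:
--                     return
--
-- def extend_with_remaining_edges(selected, selected_set, k, adjs):
--     for graph_adj in adjs:
--         for u, nbrs in graph_adj.items():
--             for v, _ in nbrs:
--                 edge = (u, v)
--                 if edge in selected_set:
--                     continue
--                 selected.append(edge)
--                 selected_set.add(edge)
--                 if len(selected) >= k:
--                     return
--
-- def smart_pad_selected(selected, k, primary_adj, seeds, fallback_adj=None):
--     if len(selected) >= k:
--         return selected
--
--     selected_set = set(selected)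
--     adjs = [primary_adj]
--     if fallback_adj is not None and fallback_adj is not primary_adj:
--         adjs.append(fallback_adj)
--
--     one_hop_sources = set()
--     for graph_adj in adjs:
--         one_hop_sources.update(get_one_hop_sources(graph_adj, seeds))
--
--     extend_with_source_priority(selected, selected_set, k, adjs, seeds)
--     if len(selected) < k:
--         extend_with_source_priority(selected, selected_set, k, adjs, one_hop_sources)
--     if len(selected) < k:
--         extend_with_remaining_edges(selected, selected_set, k, adjs)
--
--     return selected
-- ===== SOURCE B (Python) =====
-- def smart_pad_selected(selected, k, primary_adj, seeds, fallback_adj=None):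
--     if len(selected) >= k:
--         return selected
--
--     adjs = [primary_adj]
--     if fallback_adj is not None and fallback_adj is not primary_adj:
--         adjs.append(fallback_adj)
--
--     one_hop = set()
--     for adj in adjs:
--         for seed in seeds:
--             for v, _ in adj.get(seed, ()):
--                 if v not in seeds:
--                     one_hop.add(v)
--
--     # one pass: drop each edge's later occurrences, route its first occurrence
--     # into a priority bucket chosen by its source node
--     seen = set(selected)
--     buckets = ([], [], [])
--     for adj in adjs:
--         for u, nbrs in adj.items():
--             bucket = buckets[0 if u in seeds else (1 if u in one_hop else 2)]
--             for v, _ in nbrs: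
--                 edge = (u, v)
--                 if edge not in seen:
--                     seen.add(edge)
--                     bucket.append(edge)
--
--     selected.extend((buckets[0] + buckets[1] + buckets[2])[:k - len(selected)])
--     return selected
-- ===== Notes on version B (the rewrite author's own statement) =====
-- stated objective: alternative
-- what changed: Replaces A's three sequential scans of all adjacency graphs (seed-tier, one-hop-tier, remaining) by a single pass that routes each edge's first occurrence into one of three priority buckets keyed by its source node, then extends selected with the concatenated buckets truncated to k.
import Mathlib
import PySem

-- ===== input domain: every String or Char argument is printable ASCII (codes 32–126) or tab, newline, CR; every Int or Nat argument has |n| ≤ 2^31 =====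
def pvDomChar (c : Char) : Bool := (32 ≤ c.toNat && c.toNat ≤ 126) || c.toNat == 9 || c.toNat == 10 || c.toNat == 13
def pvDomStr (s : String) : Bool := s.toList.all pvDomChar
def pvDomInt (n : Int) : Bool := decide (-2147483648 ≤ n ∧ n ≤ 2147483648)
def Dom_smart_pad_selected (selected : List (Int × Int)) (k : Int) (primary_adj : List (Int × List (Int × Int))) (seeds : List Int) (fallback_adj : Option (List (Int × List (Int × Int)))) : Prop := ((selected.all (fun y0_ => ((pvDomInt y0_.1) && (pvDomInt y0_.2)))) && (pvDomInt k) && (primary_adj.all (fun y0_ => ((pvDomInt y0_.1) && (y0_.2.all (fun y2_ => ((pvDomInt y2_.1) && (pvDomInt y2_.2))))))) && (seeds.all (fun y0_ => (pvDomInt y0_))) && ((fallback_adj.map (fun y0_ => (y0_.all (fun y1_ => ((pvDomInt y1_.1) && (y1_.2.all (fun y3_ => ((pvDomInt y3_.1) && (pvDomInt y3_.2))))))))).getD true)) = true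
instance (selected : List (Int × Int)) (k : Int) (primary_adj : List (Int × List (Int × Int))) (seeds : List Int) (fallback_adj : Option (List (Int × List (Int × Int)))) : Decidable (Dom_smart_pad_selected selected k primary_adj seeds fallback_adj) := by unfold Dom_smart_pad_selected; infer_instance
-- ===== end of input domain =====

-- B replaces A's three sequential scans of the adjacency graphs by one bucketing pass
-- (objective: alternative — a different decomposition of the same tier-priority padding).
-- Both Pythons append to `selected` in place and return that same list; the equivalence
-- proved here is about the RETURN value (B performs the same in-place extension).
-- Python's `fallback_adj is not primary_adj` identity test is ported as always-true for
-- `some fa` (distinct objects at every call with separately built arguments); both ports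
-- treat it identically.

-- ===== PORT A =====
-- adjs = [primary_adj] (+ fallback_adj when given; `is not primary_adj` holds for the
-- distinct objects every call site passes); A and B build this list with identical code,
-- so the helper is shared by both ports
def pvMkAdjs (primary_adj : List (Int × List (Int × Int))) (fallback_adj : Option (List (Int × List (Int × Int)))) :
    List (PySem.Dict Int (List (Int × Int))) :=
  match fallback_adj with
  | some fa => [PySem.Dict.ofList primary_adj, PySem.Dict.ofList fa]
  | none => [PySem.Dict.ofList primary_adj]

-- helper get_one_hop_sources(adj, seeds)
def aOneHop (adj : PySem.Dict Int (List (Int × Int))) (seeds : List Int) : PySem.Set Int :=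
  seeds.foldl (fun oh seed =>
    (adj.getD seed []).foldl (fun oh p =>
      if seeds.contains p.1 then oh else PySem.Set.add oh p.1) oh) PySem.Set.empty

-- inner `for v, _ in nbrs` of the extend_* helpers; the Python early `return`
-- once len(selected) >= k is encoded as the head guard of each remaining step
def aExtNbrs (k : Int) (u : Int) (nbrs : List (Int × Int))
    (st : List (Int × Int) × PySem.Set (Int × Int)) : List (Int × Int) × PySem.Set (Int × Int) :=
  match nbrs with
  | [] => st
  | p :: rest =>
    if (st.1.length : Int) ≥ k then st
    else
      let edge := (u, p.1)
      if PySem.Set.contains st.2 edge then aExtNbrs k u rest st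
      else aExtNbrs k u rest (st.1 ++ [edge], PySem.Set.add st.2 edge)

-- extend_with_source_priority: `u not in source_set → continue`; srcMem is the membership test
def aExtPrioItems (k : Int) (srcMem : Int → Bool) (items : List (Int × List (Int × Int)))
    (st : List (Int × Int) × PySem.Set (Int × Int)) : List (Int × Int) × PySem.Set (Int × Int) :=
  match items with
  | [] => st
  | it :: rest =>
    if srcMem it.1 then aExtPrioItems k srcMem rest (aExtNbrs k it.1 it.2 st)
    else aExtPrioItems k srcMem rest st

def aExtPrioAdjs (k : Int) (srcMem : Int → Bool) (adjs : List (PySem.Dict Int (List (Int × Int))))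
    (st : List (Int × Int) × PySem.Set (Int × Int)) : List (Int × Int) × PySem.Set (Int × Int) :=
  adjs.foldl (fun st adj => aExtPrioItems k srcMem adj.items st) st

-- extend_with_remaining_edges
def aExtRemItems (k : Int) (items : List (Int × List (Int × Int)))
    (st : List (Int × Int) × PySem.Set (Int × Int)) : List (Int × Int) × PySem.Set (Int × Int) :=
  match items with
  | [] => st
  | it :: rest => aExtRemItems k rest (aExtNbrs k it.1 it.2 st)

def aExtRemAdjs (k : Int) (adjs : List (PySem.Dict Int (List (Int × Int))))
    (st : List (Int × Int) × PySem.Set (Int × Int)) : List (Int × Int) × PySem.Set (Int × Int) :=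
  adjs.foldl (fun st adj => aExtRemItems k adj.items st) st

def smart_pad_selected (selected : List (Int × Int)) (k : Int) (primary_adj : List (Int × List (Int × Int))) (seeds : List Int) (fallback_adj : Option (List (Int × List (Int × Int)))) : List (Int × Int) :=
  if (selected.length : Int) ≥ k then selected
  else
    let selectedSet := PySem.Set.ofList selected
    let adjs := pvMkAdjs primary_adj fallback_adj
    let oneHop := adjs.foldl (fun oh adj => PySem.Set.update oh (aOneHop adj seeds)) PySem.Set.empty
    let st0 := aExtPrioAdjs k (fun u => seeds.contains u) adjs (selected, selectedSet)
    let st1 := if (st0.1.length : Int) < k then aExtPrioAdjs k (fun u => PySem.Set.contains oneHop u) adjs st0 else st0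
    let st2 := if (st1.1.length : Int) < k then aExtRemAdjs k adjs st1 else st1
    st2.1

-- ===== PORT B =====
def bOneHop (adjs : List (PySem.Dict Int (List (Int × Int)))) (seeds : List Int) : PySem.Set Int :=
  adjs.foldl (fun oh adj =>
    seeds.foldl (fun oh seed =>
      (adj.getD seed []).foldl (fun oh p =>
        if seeds.contains p.1 then oh else PySem.Set.add oh p.1) oh) oh) PySem.Set.empty

-- `0 if u in seeds else (1 if u in one_hop else 2)`
def bTier (seeds : List Int) (oneHop : PySem.Set Int) (u : Int) : Nat :=
  if seeds.contains u then 0 else if PySem.Set.contains oneHop u then 1 else 2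

-- `bucket.append(edge)` on the chosen bucket
def bPush (bs : List (Int × Int) × List (Int × Int) × List (Int × Int)) (t : Nat) (e : Int × Int) :
    List (Int × Int) × List (Int × Int) × List (Int × Int) :=
  if t = 0 then (bs.1 ++ [e], bs.2.1, bs.2.2)
  else if t = 1 then (bs.1, bs.2.1 ++ [e], bs.2.2)
  else (bs.1, bs.2.1, bs.2.2 ++ [e])

def bBucketNbrs (t : Nat) (u : Int) (nbrs : List (Int × Int))
    (st : PySem.Set (Int × Int) × List (Int × Int) × List (Int × Int) × List (Int × Int)) :
    PySem.Set (Int × Int) × List (Int × Int) × List (Int × Int) × List (Int × Int) :=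
  match nbrs with
  | [] => st
  | p :: rest =>
    let edge := (u, p.1)
    if PySem.Set.contains st.1 edge then bBucketNbrs t u rest st
    else bBucketNbrs t u rest (PySem.Set.add st.1 edge, bPush st.2 t edge)

def bBucketItems (seeds : List Int) (oneHop : PySem.Set Int) (items : List (Int × List (Int × Int)))
    (st : PySem.Set (Int × Int) × List (Int × Int) × List (Int × Int) × List (Int × Int)) :
    PySem.Set (Int × Int) × List (Int × Int) × List (Int × Int) × List (Int × Int) :=
  items.foldl (fun st it => bBucketNbrs (bTier seeds oneHop it.1) it.1 it.2 st) st

def bBucketAdjs (seeds : List Int) (oneHop : PySem.Set Int) (adjs : List (PySem.Dict Int (List (Int × Int))))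
    (st : PySem.Set (Int × Int) × List (Int × Int) × List (Int × Int) × List (Int × Int)) :
    PySem.Set (Int × Int) × List (Int × Int) × List (Int × Int) × List (Int × Int) :=
  adjs.foldl (fun st adj => bBucketItems seeds oneHop adj.items st) st

def smart_pad_selected_alt (selected : List (Int × Int)) (k : Int) (primary_adj : List (Int × List (Int × Int))) (seeds : List Int) (fallback_adj : Option (List (Int × List (Int × Int)))) : List (Int × Int) :=
  if (selected.length : Int) ≥ k then selected
  else
    let adjs := pvMkAdjs primary_adj fallback_adj
    let oneHop := bOneHop adjs seeds
    let st := bBucketAdjs seeds oneHop adjs (PySem.Set.ofList selected, [], [], [])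
    -- `(b0 + b1 + b2)[:k - len(selected)]`; here k - len(selected) ≥ 1
    selected ++ (st.2.1 ++ st.2.2.1 ++ st.2.2.2).take (k - selected.length).toNat

-- ===== PRECONDITION & SPEC =====
def Spec_smart_pad_selected (selected : List (Int × Int)) (k : Int) (primary_adj : List (Int × List (Int × Int))) (seeds : List Int) (fallback_adj : Option (List (Int × List (Int × Int)))) (out : List (Int × Int)) : Prop := out = smart_pad_selected_alt selected k primary_adj seeds fallback_adj
instance (selected : List (Int × Int)) (k : Int) (primary_adj : List (Int × List (Int × Int))) (seeds : List Int) (fallback_adj : Option (List (Int × List (Int × Int)))) (out : List (Int × Int)) : Decidable (Spec_smart_pad_selected selected k primary_adj seeds fallback_adj out) := by unfold Spec_smart_pad_selected; infer_instance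

-- ===== CLAIM (what is proved, stated in full; the proofs are below) =====
def Claim_equal_smart_pad_selected : Prop := ∀ (selected : List (Int × Int)) (k : Int) (primary_adj : List (Int × List (Int × Int))) (seeds : List Int) (fallback_adj : Option (List (Int × List (Int × Int)))), Dom_smart_pad_selected selected k primary_adj seeds fallback_adj → Spec_smart_pad_selected selected k primary_adj seeds fallback_adj (smart_pad_selected selected k primary_adj seeds fallback_adj)

-- ===== LEMMAS AND PROOFS =====

-- abstractions: the edge stream of the graphs, first-occurrence dedup against a set,
-- and the "append until k" loop
def pvEdges (items : List (Int × List (Int × Int))) : List (Int × Int) :=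
  items.flatMap (fun it => it.2.map (fun p => (it.1, p.1)))

def pvAllE (adjs : List (PySem.Dict Int (List (Int × Int)))) : List (Int × Int) :=
  adjs.flatMap (fun adj => pvEdges adj.items)

def pvDedup (S : PySem.Set (Int × Int)) : List (Int × Int) → List (Int × Int)
  | [] => []
  | e :: es => if PySem.Set.contains S e then pvDedup S es
               else e :: pvDedup (PySem.Set.add S e) es

def pvPad (k : Int) (st : List (Int × Int) × PySem.Set (Int × Int)) :
    List (Int × Int) → List (Int × Int) × PySem.Set (Int × Int)
  | [] => st
  | e :: es =>
    if (st.1.length : Int) ≥ k then st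
    else if PySem.Set.contains st.2 e then pvPad k st es
    else pvPad k (st.1 ++ [e], PySem.Set.add st.2 e) es

theorem pvPad_stop (k : Int) (st : List (Int × Int) × PySem.Set (Int × Int))
    (es : List (Int × Int)) (h : (st.1.length : Int) ≥ k) : pvPad k st es = st := by
  cases es with
  | nil => rfl
  | cons e es => simp [pvPad, h]

theorem pvPad_append (k : Int) (xs ys : List (Int × Int)) :
    ∀ st, pvPad k st (xs ++ ys) = pvPad k (pvPad k st xs) ys := by
  induction xs with
  | nil => intro st; rfl
  | cons x xs ih =>
    intro st
    by_cases h : (st.1.length : Int) ≥ k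
    · rw [List.cons_append]
      simp only [pvPad, if_pos h]
      rw [pvPad_stop k st ys h]
    · rw [List.cons_append]
      simp only [pvPad, if_neg h]
      split <;> rw [ih]

theorem pvPad_eq_take (k : Int) (es : List (Int × Int)) :
    ∀ sel S, (pvPad k (sel, S) es).1 = sel ++ (pvDedup S es).take (k - sel.length).toNat := by
  induction es with
  | nil => intro sel S; simp [pvPad, pvDedup]
  | cons e es ih =>
    intro sel S
    by_cases h : (sel.length : Int) ≥ k
    · have h0 : (k - (sel.length : Int)).toNat = 0 := by omega
      simp [pvPad, h, h0]
    · simp only [pvPad, if_neg h, pvDedup]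
      by_cases hc : PySem.Set.contains S e = true
      · rw [if_pos hc, if_pos hc]; exact ih sel S
      · have h1 : (k - (sel.length : Int)).toNat = ((k - ((sel.length : Int) + 1)).toNat) + 1 := by omega
        rw [if_neg hc, if_neg hc, ih]
        simp [h1, List.take_succ_cons]

theorem pvDedup_congr (es : List (Int × Int)) :
    ∀ S T : PySem.Set (Int × Int), (∀ e ∈ es, (e ∈ S ↔ e ∈ T)) → pvDedup S es = pvDedup T es := by
  induction es with
  | nil => intros; rfl
  | cons e es ih =>
    intro S T h
    have hmem : e ∈ S ↔ e ∈ T := h e (List.mem_cons_self)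
    have hco : PySem.Set.contains S e = PySem.Set.contains T e := by
      by_cases hS : e ∈ S
      · rw [(PySem.Set.contains_iff _ _).mpr hS, (PySem.Set.contains_iff _ _).mpr (hmem.mp hS)]
      · have hT : e ∉ T := fun hx => hS (hmem.mpr hx)
        have t1 : PySem.Set.contains S e = false :=
          Bool.eq_false_iff.mpr (fun hx => hS ((PySem.Set.contains_iff _ _).mp hx))
        have t2 : PySem.Set.contains T e = false :=
          Bool.eq_false_iff.mpr (fun hx => hT ((PySem.Set.contains_iff _ _).mp hx))
        rw [t1, t2]
    simp only [pvDedup, hco]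
    split
    · exact ih S T (fun f hf => h f (List.mem_cons_of_mem _ hf))
    · rw [ih (PySem.Set.add S e) (PySem.Set.add T e)
        (fun f hf => by simp [PySem.Set.mem_add, h f (List.mem_cons_of_mem _ hf)])]

theorem pvDedup_append (xs ys : List (Int × Int)) :
    ∀ S, pvDedup S (xs ++ ys) = pvDedup S xs ++ pvDedup (PySem.Set.update S xs) ys := by
  induction xs with
  | nil => intro S; simp [pvDedup, PySem.Set.update]
  | cons x xs ih =>
    intro S
    simp only [List.cons_append, pvDedup, PySem.Set.update_cons]
    by_cases hc : PySem.Set.contains S x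
    · have hx : x ∈ S := (PySem.Set.contains_iff _ _).mp hc
      rw [if_pos hc, if_pos hc, ih, PySem.Set.add_of_mem hx]
    · rw [if_neg hc, if_neg hc, ih]
      simp

theorem pvDedup_filter (p : (Int × Int) → Bool) (es : List (Int × Int)) :
    ∀ S T : PySem.Set (Int × Int),
      (∀ e ∈ es, (p e = false → e ∈ T) ∧ (p e = true → (e ∈ T ↔ e ∈ S))) →
      pvDedup T es = pvDedup S (es.filter p) := by
  induction es with
  | nil => intros; rfl
  | cons e es ih =>
    intro S T h
    by_cases hp : p e
    · have hiff := (h e List.mem_cons_self).2 hp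
      have hco : PySem.Set.contains T e = PySem.Set.contains S e := by
        by_cases hT : e ∈ T
        · rw [(PySem.Set.contains_iff _ _).mpr hT, (PySem.Set.contains_iff _ _).mpr (hiff.mp hT)]
        · have hS : e ∉ S := fun hx => hT (hiff.mpr hx)
          have t1 : PySem.Set.contains T e = false :=
            Bool.eq_false_iff.mpr (fun hx => hT ((PySem.Set.contains_iff _ _).mp hx))
          have t2 : PySem.Set.contains S e = false :=
            Bool.eq_false_iff.mpr (fun hx => hS ((PySem.Set.contains_iff _ _).mp hx))
          rw [t1, t2]
      rw [List.filter_cons, if_pos hp]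
      simp only [pvDedup, hco]
      split
      · exact ih S T (fun f hf => h f (List.mem_cons_of_mem _ hf))
      · rw [ih (PySem.Set.add S e) (PySem.Set.add T e) ?_]
        intro f hf
        refine ⟨fun hpf => ?_, fun hpf => ?_⟩
        · exact (PySem.Set.mem_add _ _ _).mpr (Or.inl ((h f (List.mem_cons_of_mem _ hf)).1 hpf))
        · simp [PySem.Set.mem_add, (h f (List.mem_cons_of_mem _ hf)).2 hpf]
    · have hT : e ∈ T := (h e List.mem_cons_self).1 (by simpa using hp)
      have hco : PySem.Set.contains T e = true := (PySem.Set.contains_iff _ _).mpr hT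
      have hpf : p e = false := Bool.not_eq_true _ ▸ (by simpa using hp)
      rw [List.filter_cons]
      simp only [hpf, Bool.false_eq_true, if_false]
      simp only [pvDedup]
      rw [if_pos hco]
      exact ih S T (fun f hf => h f (List.mem_cons_of_mem _ hf))

-- A-side flattening
theorem aExtNbrs_eq (k : Int) (u : Int) (nbrs : List (Int × Int)) :
    ∀ st, aExtNbrs k u nbrs st = pvPad k st (nbrs.map (fun p => (u, p.1))) := by
  induction nbrs with
  | nil => intro st; rfl
  | cons p rest ih => intro st; simp only [aExtNbrs, List.map_cons, pvPad]; split <;> try rfl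
                      split <;> rw [ih]

theorem pvFilterGroup (srcMem : Int → Bool) (u : Int) (l : List (Int × Int)) :
    (l.map (fun p => (u, p.1))).filter (fun e => srcMem e.1) =
      if srcMem u then l.map (fun p => (u, p.1)) else [] := by
  induction l with
  | nil => simp
  | cons p rest ih => by_cases hs : srcMem u <;> simp [hs, ih]

theorem aExtPrioItems_eq (k : Int) (srcMem : Int → Bool) (items : List (Int × List (Int × Int))) :
    ∀ st, aExtPrioItems k srcMem items st = pvPad k st ((pvEdges items).filter (fun e => srcMem e.1)) := by
  induction items with
  | nil => intro st; simp [aExtPrioItems, pvEdges, pvPad]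
  | cons it rest ih =>
    intro st
    have hed : pvEdges (it :: rest) = it.2.map (fun p => (it.1, p.1)) ++ pvEdges rest := by
      simp [pvEdges]
    rw [hed, List.filter_append, pvFilterGroup, pvPad_append]
    by_cases hs : srcMem it.1
    · simp [aExtPrioItems, hs, ih, aExtNbrs_eq]
    · have hsf : srcMem it.1 = false := by simpa using hs
      simp [aExtPrioItems, hsf, ih, pvPad]

theorem aExtPrioAdjs_eq (k : Int) (srcMem : Int → Bool) (adjs : List (PySem.Dict Int (List (Int × Int)))) :
    ∀ st, aExtPrioAdjs k srcMem adjs st = pvPad k st ((pvAllE adjs).filter (fun e => srcMem e.1)) := by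
  induction adjs with
  | nil => intro st; simp [aExtPrioAdjs, pvAllE, pvPad]
  | cons adj rest ih =>
    intro st
    have hed : pvAllE (adj :: rest) = pvEdges adj.items ++ pvAllE rest := by simp [pvAllE]
    rw [hed, List.filter_append, pvPad_append]
    show aExtPrioAdjs k srcMem rest (aExtPrioItems k srcMem adj.items st) = _
    rw [ih, aExtPrioItems_eq]

theorem aExtRemItems_eq (k : Int) (items : List (Int × List (Int × Int))) :
    ∀ st, aExtRemItems k items st = pvPad k st (pvEdges items) := by
  induction items with
  | nil => intro st; simp [aExtRemItems, pvEdges, pvPad]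
  | cons it rest ih =>
    intro st
    have hed : pvEdges (it :: rest) = it.2.map (fun p => (it.1, p.1)) ++ pvEdges rest := by
      simp [pvEdges]
    rw [hed, pvPad_append]
    show aExtRemItems k rest (aExtNbrs k it.1 it.2 st) = _
    rw [ih, aExtNbrs_eq]

theorem aExtRemAdjs_eq (k : Int) (adjs : List (PySem.Dict Int (List (Int × Int)))) :
    ∀ st, aExtRemAdjs k adjs st = pvPad k st (pvAllE adjs) := by
  induction adjs with
  | nil => intro st; simp [aExtRemAdjs, pvAllE, pvPad]
  | cons adj rest ih =>
    intro st
    have hed : pvAllE (adj :: rest) = pvEdges adj.items ++ pvAllE rest := by simp [pvAllE]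
    rw [hed, pvPad_append]
    show aExtRemAdjs k rest (aExtRemItems k adj.items st) = _
    rw [ih, aExtRemItems_eq]

-- B-side flattening
def pvBuck (tf : (Int × Int) → Nat)
    (st : PySem.Set (Int × Int) × List (Int × Int) × List (Int × Int) × List (Int × Int)) :
    List (Int × Int) → PySem.Set (Int × Int) × List (Int × Int) × List (Int × Int) × List (Int × Int)
  | [] => st
  | e :: es =>
    if PySem.Set.contains st.1 e then pvBuck tf st es
    else pvBuck tf (PySem.Set.add st.1 e, bPush st.2 (tf e) e) es

theorem pvBuck_append (tf : (Int × Int) → Nat) (xs ys : List (Int × Int)) :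
    ∀ st, pvBuck tf st (xs ++ ys) = pvBuck tf (pvBuck tf st xs) ys := by
  induction xs with
  | nil => intro st; rfl
  | cons x xs ih =>
    intro st
    rw [List.cons_append]
    simp only [pvBuck]
    split <;> rw [ih]

theorem bBucketNbrs_eq (tf : (Int × Int) → Nat) (t : Nat) (u : Int) (nbrs : List (Int × Int))
    (h : ∀ p ∈ nbrs, tf (u, p.1) = t) :
    ∀ st, bBucketNbrs t u nbrs st = pvBuck tf st (nbrs.map (fun p => (u, p.1))) := by
  induction nbrs with
  | nil => intro st; rfl
  | cons p rest ih =>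
    intro st
    have hp : tf (u, p.1) = t := h p List.mem_cons_self
    simp only [bBucketNbrs, List.map_cons, pvBuck, hp]
    split <;> exact ih (fun q hq => h q (List.mem_cons_of_mem _ hq)) _

theorem bBucketItems_eq (seeds : List Int) (oneHop : PySem.Set Int) (items : List (Int × List (Int × Int))) :
    ∀ st, bBucketItems seeds oneHop items st =
      pvBuck (fun e => bTier seeds oneHop e.1) st (pvEdges items) := by
  induction items with
  | nil => intro st; rfl
  | cons it rest ih =>
    intro st
    have hed : pvEdges (it :: rest) = it.2.map (fun p => (it.1, p.1)) ++ pvEdges rest := by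
      simp [pvEdges]
    rw [hed, pvBuck_append]
    show bBucketItems seeds oneHop rest (bBucketNbrs (bTier seeds oneHop it.1) it.1 it.2 st) = _
    rw [ih, bBucketNbrs_eq (fun e => bTier seeds oneHop e.1) _ _ _ (fun p _ => rfl)]

theorem bBucketAdjs_eq (seeds : List Int) (oneHop : PySem.Set Int) (adjs : List (PySem.Dict Int (List (Int × Int)))) :
    ∀ st, bBucketAdjs seeds oneHop adjs st =
      pvBuck (fun e => bTier seeds oneHop e.1) st (pvAllE adjs) := by
  induction adjs with
  | nil => intro st; rfl
  | cons adj rest ih =>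
    intro st
    have hed : pvAllE (adj :: rest) = pvEdges adj.items ++ pvAllE rest := by simp [pvAllE]
    rw [hed, pvBuck_append]
    show bBucketAdjs seeds oneHop rest (bBucketItems seeds oneHop adj.items st) = _
    rw [ih, bBucketItems_eq]

def pvPick (t : Nat) (S0 S1 S2 : PySem.Set (Int × Int)) : PySem.Set (Int × Int) :=
  if t = 0 then S0 else if t = 1 then S1 else S2

theorem pvBuck_main (tf : (Int × Int) → Nat) (es : List (Int × Int)) :
    ∀ (seen : PySem.Set (Int × Int)) (b0 b1 b2 : List (Int × Int)) (S0 S1 S2 : PySem.Set (Int × Int)),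
      (∀ e ∈ es, (e ∈ seen ↔ e ∈ pvPick (tf e) S0 S1 S2)) →
      pvBuck tf (seen, b0, b1, b2) es =
        (PySem.Set.update seen es,
         b0 ++ pvDedup S0 (es.filter (fun e => tf e == 0)),
         b1 ++ pvDedup S1 (es.filter (fun e => tf e == 1)),
         b2 ++ pvDedup S2 (es.filter (fun e => !(tf e == 0) && !(tf e == 1)))) := by
  induction es with
  | nil => intro seen b0 b1 b2 S0 S1 S2 _; simp [pvBuck, pvDedup, PySem.Set.update]
  | cons e es ih =>
    intro seen b0 b1 b2 S0 S1 S2 h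
    have he := h e List.mem_cons_self
    have hrest := fun f hf => h f (List.mem_cons_of_mem e hf)
    by_cases e0 : tf e = 0
    · -- head edge goes to bucket 0
      have c0 : (tf e == 0) = true := by simp [e0]
      have c1 : (tf e == 1) = false := by simp [e0]
      have c2 : (!(tf e == 0) && !(tf e == 1)) = false := by simp [e0]
      have hpick : pvPick (tf e) S0 S1 S2 = S0 := by simp [pvPick, e0]
      simp only [pvBuck]
      by_cases hc : PySem.Set.contains seen e = true
      · have heS : e ∈ seen := (PySem.Set.contains_iff _ _).mp hc
        have he' := he
        rw [hpick] at he'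
        have heS0 : e ∈ S0 := he'.mp heS
        have hcS0 : PySem.Set.contains S0 e = true := (PySem.Set.contains_iff _ _).mpr heS0
        rw [if_pos hc, ih seen b0 b1 b2 S0 S1 S2 hrest, PySem.Set.update_cons,
            PySem.Set.add_of_mem heS]
        simp [List.filter_cons, c0, c1, c2, pvDedup, hcS0, heS0]
      · have heS : e ∉ seen := fun hx => hc ((PySem.Set.contains_iff _ _).mpr hx)
        have he' := he
        rw [hpick] at he'
        have heS0 : e ∉ S0 := fun hx => heS (he'.mpr hx)
        have hcS0 : PySem.Set.contains S0 e = false :=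
          Bool.eq_false_iff.mpr (fun hx => heS0 ((PySem.Set.contains_iff _ _).mp hx))
        rw [if_neg hc]
        show pvBuck tf (PySem.Set.add seen e, bPush (b0, b1, b2) (tf e) e) es = _
        have hpush : bPush (b0, b1, b2) (tf e) e = (b0 ++ [e], b1, b2) := by simp [bPush, e0]
        rw [hpush, ih (PySem.Set.add seen e) (b0 ++ [e]) b1 b2 (PySem.Set.add S0 e) S1 S2 ?_]
        · rw [PySem.Set.update_cons]
          simp [List.filter_cons, c0, c1, c2, pvDedup, hcS0, heS0]
        · intro f hf
          have hft := h f (List.mem_cons_of_mem _ hf)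
          rw [PySem.Set.mem_add]
          by_cases hf0 : tf f = 0
          · rw [show pvPick (tf f) (PySem.Set.add S0 e) S1 S2 = PySem.Set.add S0 e from by
                simp [pvPick, hf0], PySem.Set.mem_add]
            rw [show pvPick (tf f) S0 S1 S2 = S0 from by simp [pvPick, hf0]] at hft
            tauto
          · have hfe : f ≠ e := fun hx => hf0 (hx ▸ e0)
            rw [show pvPick (tf f) (PySem.Set.add S0 e) S1 S2 = pvPick (tf f) S0 S1 S2 from by
                simp [pvPick, hf0]]
            constructor
            · rintro (hx | hx)
              · exact hft.mp hx
              · exact absurd hx hfe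
            · intro hx; exact Or.inl (hft.mpr hx)
    · by_cases e1 : tf e = 1
      · -- head edge goes to bucket 1
        have c0 : (tf e == 0) = false := by simp [e1]
        have c1 : (tf e == 1) = true := by simp [e1]
        have c2 : (!(tf e == 0) && !(tf e == 1)) = false := by simp [e1]
        have hpick : pvPick (tf e) S0 S1 S2 = S1 := by simp [pvPick, e0, e1]
        simp only [pvBuck]
        by_cases hc : PySem.Set.contains seen e = true
        · have heS : e ∈ seen := (PySem.Set.contains_iff _ _).mp hc
          have he' := he
          rw [hpick] at he'
          have heS1 : e ∈ S1 := he'.mp heS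
          have hcS1 : PySem.Set.contains S1 e = true := (PySem.Set.contains_iff _ _).mpr heS1
          rw [if_pos hc, ih seen b0 b1 b2 S0 S1 S2 hrest, PySem.Set.update_cons,
              PySem.Set.add_of_mem heS]
          simp [List.filter_cons, c0, c1, c2, pvDedup, hcS1, heS1]
        · have heS : e ∉ seen := fun hx => hc ((PySem.Set.contains_iff _ _).mpr hx)
          have he' := he
          rw [hpick] at he'
          have heS1 : e ∉ S1 := fun hx => heS (he'.mpr hx)
          have hcS1 : PySem.Set.contains S1 e = false :=
            Bool.eq_false_iff.mpr (fun hx => heS1 ((PySem.Set.contains_iff _ _).mp hx))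
          rw [if_neg hc]
          show pvBuck tf (PySem.Set.add seen e, bPush (b0, b1, b2) (tf e) e) es = _
          have hpush : bPush (b0, b1, b2) (tf e) e = (b0, b1 ++ [e], b2) := by simp [bPush, e0, e1]
          rw [hpush, ih (PySem.Set.add seen e) b0 (b1 ++ [e]) b2 S0 (PySem.Set.add S1 e) S2 ?_]
          · rw [PySem.Set.update_cons]
            simp [List.filter_cons, c0, c1, c2, pvDedup, hcS1, heS1]
          · intro f hf
            have hft := h f (List.mem_cons_of_mem _ hf)
            rw [PySem.Set.mem_add]
            by_cases hf1 : tf f = 1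
            · rw [show pvPick (tf f) S0 (PySem.Set.add S1 e) S2 = PySem.Set.add S1 e from by
                  simp [pvPick, hf1], PySem.Set.mem_add]
              rw [show pvPick (tf f) S0 S1 S2 = S1 from by simp [pvPick, hf1]] at hft
              tauto
            · have hfe : f ≠ e := fun hx => hf1 (hx ▸ e1)
              rw [show pvPick (tf f) S0 (PySem.Set.add S1 e) S2 = pvPick (tf f) S0 S1 S2 from by
                  by_cases hf0 : tf f = 0 <;> simp [pvPick, hf0, hf1]]
              constructor
              · rintro (hx | hx)
                · exact hft.mp hx
                · exact absurd hx hfe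
              · intro hx; exact Or.inl (hft.mpr hx)
      · -- head edge goes to bucket 2
        have c0 : (tf e == 0) = false := by simp [e0]
        have c1 : (tf e == 1) = false := by simp [e1]
        have c2 : (!(tf e == 0) && !(tf e == 1)) = true := by simp [e0, e1]
        have hpick : pvPick (tf e) S0 S1 S2 = S2 := by simp [pvPick, e0, e1]
        simp only [pvBuck]
        by_cases hc : PySem.Set.contains seen e = true
        · have heS : e ∈ seen := (PySem.Set.contains_iff _ _).mp hc
          have he' := he
          rw [hpick] at he'
          have heS2 : e ∈ S2 := he'.mp heS
          have hcS2 : PySem.Set.contains S2 e = true := (PySem.Set.contains_iff _ _).mpr heS2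
          rw [if_pos hc, ih seen b0 b1 b2 S0 S1 S2 hrest, PySem.Set.update_cons,
              PySem.Set.add_of_mem heS]
          simp [List.filter_cons, c0, c1, c2, pvDedup, hcS2, heS2]
        · have heS : e ∉ seen := fun hx => hc ((PySem.Set.contains_iff _ _).mpr hx)
          have he' := he
          rw [hpick] at he'
          have heS2 : e ∉ S2 := fun hx => heS (he'.mpr hx)
          have hcS2 : PySem.Set.contains S2 e = false :=
            Bool.eq_false_iff.mpr (fun hx => heS2 ((PySem.Set.contains_iff _ _).mp hx))
          rw [if_neg hc]
          show pvBuck tf (PySem.Set.add seen e, bPush (b0, b1, b2) (tf e) e) es = _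
          have hpush : bPush (b0, b1, b2) (tf e) e = (b0, b1, b2 ++ [e]) := by
            simp [bPush, e0, e1]
          rw [hpush, ih (PySem.Set.add seen e) b0 b1 (b2 ++ [e]) S0 S1 (PySem.Set.add S2 e) ?_]
          · rw [PySem.Set.update_cons]
            simp [List.filter_cons, c0, c1, c2, pvDedup, hcS2, heS2]
          · intro f hf
            have hft := h f (List.mem_cons_of_mem _ hf)
            rw [PySem.Set.mem_add]
            by_cases hf0 : tf f = 0
            · have hfe : f ≠ e := fun hx => e0 (hx ▸ hf0)
              rw [show pvPick (tf f) S0 S1 (PySem.Set.add S2 e) = pvPick (tf f) S0 S1 S2 from by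
                  simp [pvPick, hf0]]
              constructor
              · rintro (hx | hx)
                · exact hft.mp hx
                · exact absurd hx hfe
              · intro hx; exact Or.inl (hft.mpr hx)
            · by_cases hf1 : tf f = 1
              · have hfe : f ≠ e := fun hx => e1 (hx ▸ hf1)
                rw [show pvPick (tf f) S0 S1 (PySem.Set.add S2 e) = pvPick (tf f) S0 S1 S2 from by
                    simp [pvPick, hf0, hf1]]
                constructor
                · rintro (hx | hx)
                  · exact hft.mp hx
                  · exact absurd hx hfe
                · intro hx; exact Or.inl (hft.mpr hx)
              · rw [show pvPick (tf f) S0 S1 (PySem.Set.add S2 e) = PySem.Set.add S2 e from by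
                    simp [pvPick, hf0, hf1], PySem.Set.mem_add]
                rw [show pvPick (tf f) S0 S1 S2 = S2 from by simp [pvPick, hf0, hf1]] at hft
                tauto

-- membership in the one-hop sets (A builds per-graph sets and unions them, B builds one set)
def pvOH (adjs : List (PySem.Dict Int (List (Int × Int)))) (seeds : List Int) (v : Int) : Prop :=
  ∃ adj ∈ adjs, ∃ sd ∈ seeds, ∃ p ∈ adj.getD sd ([] : List (Int × Int)),
    seeds.contains p.1 = false ∧ p.1 = v

theorem mem_foldl_char {α β : Type} [BEq β] [LawfulBEq β]
    (g : PySem.Set β → α → PySem.Set β) (P : α → β → Prop)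
    (hg : ∀ s a v, v ∈ g s a ↔ v ∈ s ∨ P a v) (l : List α) :
    ∀ s0 v, v ∈ l.foldl g s0 ↔ v ∈ s0 ∨ ∃ a ∈ l, P a v := by
  induction l with
  | nil => intro s0 v; simp
  | cons a l ih =>
    intro s0 v
    rw [List.foldl_cons, ih, hg]
    constructor
    · rintro ((h | h) | ⟨b, hb, hp⟩)
      · exact Or.inl h
      · exact Or.inr ⟨a, List.mem_cons_self, h⟩
      · exact Or.inr ⟨b, List.mem_cons_of_mem _ hb, hp⟩
    · rintro (h | ⟨b, hb, hp⟩)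
      · exact Or.inl (Or.inl h)
      · rcases List.mem_cons.mp hb with hba | hb
        · subst hba; exact Or.inl (Or.inr hp)
        · exact Or.inr ⟨b, hb, hp⟩

theorem mem_ohInner (seeds : List Int) (l : List (Int × Int)) (oh : PySem.Set Int) (v : Int) :
    v ∈ l.foldl (fun oh p => if seeds.contains p.1 then oh else PySem.Set.add oh p.1) oh ↔
      v ∈ oh ∨ ∃ p ∈ l, seeds.contains p.1 = false ∧ p.1 = v := by
  refine mem_foldl_char _ (fun p v => seeds.contains p.1 = false ∧ p.1 = v) ?_ l oh v
  intro s p w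
  by_cases hc : seeds.contains p.1 = true
  · rw [if_pos hc]
    constructor
    · exact Or.inl
    · rintro (h | ⟨hf, _⟩)
      · exact h
      · rw [hc] at hf; cases hf
  · have hcf : seeds.contains p.1 = false := by simpa using hc
    rw [if_neg hc]
    constructor
    · intro h
      rcases (PySem.Set.mem_add _ _ _).mp h with h | h
      · exact Or.inl h
      · exact Or.inr ⟨hcf, h.symm⟩
    · rintro (h | ⟨_, h⟩)
      · exact (PySem.Set.mem_add _ _ _).mpr (Or.inl h)
      · exact (PySem.Set.mem_add _ _ _).mpr (Or.inr h.symm)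

theorem mem_ohSeeds (seeds : List Int) (adj : PySem.Dict Int (List (Int × Int))) (oh : PySem.Set Int) (v : Int) :
    v ∈ seeds.foldl (fun oh sd =>
        (adj.getD sd []).foldl (fun oh p => if seeds.contains p.1 then oh else PySem.Set.add oh p.1) oh) oh ↔
      v ∈ oh ∨ ∃ sd ∈ seeds, ∃ p ∈ adj.getD sd ([] : List (Int × Int)), seeds.contains p.1 = false ∧ p.1 = v := by
  refine mem_foldl_char
    (fun oh sd => (adj.getD sd []).foldl
      (fun oh p => if seeds.contains p.1 then oh else PySem.Set.add oh p.1) oh)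
    (fun sd w => ∃ p ∈ adj.getD sd ([] : List (Int × Int)), seeds.contains p.1 = false ∧ p.1 = w)
    ?_ seeds oh v
  intro s sd w
  exact mem_ohInner seeds (adj.getD sd []) s w

theorem mem_aOneHop (adj : PySem.Dict Int (List (Int × Int))) (seeds : List Int) (v : Int) :
    v ∈ aOneHop adj seeds ↔
      ∃ sd ∈ seeds, ∃ p ∈ adj.getD sd ([] : List (Int × Int)),
        seeds.contains p.1 = false ∧ p.1 = v := by
  unfold aOneHop
  rw [mem_ohSeeds]
  simp [PySem.Set.empty]

theorem mem_aOneHopAll (adjs : List (PySem.Dict Int (List (Int × Int)))) (seeds : List Int) (v : Int) :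
    v ∈ adjs.foldl (fun oh adj => PySem.Set.update oh (aOneHop adj seeds)) PySem.Set.empty ↔
      pvOH adjs seeds v := by
  refine (mem_foldl_char (fun oh adj => PySem.Set.update oh (aOneHop adj seeds))
    (fun adj w => ∃ sd ∈ seeds, ∃ p ∈ adj.getD sd ([] : List (Int × Int)),
      seeds.contains p.1 = false ∧ p.1 = w) ?_ adjs PySem.Set.empty v).trans ?_
  · intro s adj w
    exact (PySem.Set.mem_update _ _ _).trans (or_congr Iff.rfl (mem_aOneHop adj seeds w))
  · simp [pvOH, PySem.Set.empty]

theorem mem_bOneHop (adjs : List (PySem.Dict Int (List (Int × Int)))) (seeds : List Int) (v : Int) :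
    v ∈ bOneHop adjs seeds ↔ pvOH adjs seeds v := by
  unfold bOneHop
  refine (mem_foldl_char (fun oh adj => seeds.foldl (fun oh seed =>
      (adj.getD seed []).foldl (fun oh p =>
        if seeds.contains p.1 then oh else PySem.Set.add oh p.1) oh) oh)
    (fun adj w => ∃ sd ∈ seeds, ∃ p ∈ adj.getD sd ([] : List (Int × Int)),
      seeds.contains p.1 = false ∧ p.1 = w) ?_ adjs PySem.Set.empty v).trans ?_
  · intro s adj w
    exact mem_ohSeeds seeds adj s w
  · simp [pvOH, PySem.Set.empty]

theorem pvOH_not_seed (adjs : List (PySem.Dict Int (List (Int × Int)))) (seeds : List Int) (v : Int)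
    (h : pvOH adjs seeds v) : seeds.contains v = false := by
  obtain ⟨adj, _, sd, _, p, _, hc, rfl⟩ := h
  exact hc

theorem pvPad_if (k : Int) (st : List (Int × Int) × PySem.Set (Int × Int)) (es : List (Int × Int)) :
    (if (st.1.length : Int) < k then pvPad k st es else st) = pvPad k st es := by
  split
  · rfl
  · exact (pvPad_stop k st es (by omega)).symm

theorem pvPick_same (t : Nat) (S : PySem.Set (Int × Int)) : pvPick t S S S = S := by
  unfold pvPick; split
  · rfl
  · split <;> rfl

theorem contains_congr_of_iff {α : Type} [BEq α] [LawfulBEq α] {s t : PySem.Set α} {x : α}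
    (h : x ∈ s ↔ x ∈ t) : PySem.Set.contains s x = PySem.Set.contains t x := by
  by_cases hx : x ∈ s
  · rw [(PySem.Set.contains_iff _ _).mpr hx, (PySem.Set.contains_iff _ _).mpr (h.mp hx)]
  · rw [Bool.eq_false_iff.mpr (fun c => hx ((PySem.Set.contains_iff _ _).mp c)),
        Bool.eq_false_iff.mpr (fun c => hx (h.mpr ((PySem.Set.contains_iff _ _).mp c)))]

theorem smart_pad_selected_spec : Claim_equal_smart_pad_selected := by
  intro selected k primary_adj seeds fallback_adj _
  unfold Spec_smart_pad_selected smart_pad_selected smart_pad_selected_alt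
  by_cases hk : (selected.length : Int) ≥ k
  · rw [if_pos hk, if_pos hk]
  · rw [if_neg hk, if_neg hk]
    dsimp only
    set adjs : List (PySem.Dict Int (List (Int × Int))) := pvMkAdjs primary_adj fallback_adj
      with hadjs
    set S := PySem.Set.ofList selected with hS
    set ohA := adjs.foldl (fun oh adj => PySem.Set.update oh (aOneHop adj seeds)) PySem.Set.empty
      with hohA
    set ohB := bOneHop adjs seeds with hohB
    -- both one-hop sets have the same members, and those members are never seeds
    have hiff : ∀ v, v ∈ ohA ↔ v ∈ ohB := by
      intro v
      rw [hohA, hohB]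
      exact (mem_aOneHopAll adjs seeds v).trans (mem_bOneHop adjs seeds v).symm
    have hABb : ∀ v, PySem.Set.contains ohA v = PySem.Set.contains ohB v :=
      fun v => contains_congr_of_iff (hiff v)
    have hAseed : ∀ v, PySem.Set.contains ohA v = true → seeds.contains v = false := by
      intro v hv
      refine pvOH_not_seed adjs seeds v ?_
      rw [← mem_aOneHopAll adjs seeds v, ← hohA]
      exact (PySem.Set.contains_iff _ _).mp hv
    -- flatten both sides to pvPad / pvBuck over the edge stream
    simp only [aExtPrioAdjs_eq, aExtRemAdjs_eq, bBucketAdjs_eq, pvPad_if]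
    rw [← pvPad_append, ← pvPad_append, List.append_assoc, pvPad_eq_take,
        pvBuck_main (fun e => bTier seeds ohB e.1) (pvAllE adjs) S [] [] [] S S S
          (fun e _ => by rw [pvPick_same])]
    dsimp only
    simp only [List.nil_append]
    -- the tier filters
    have e0eq : List.filter (fun e => seeds.contains e.1) (pvAllE adjs) =
        List.filter (fun e => bTier seeds ohB e.1 == 0) (pvAllE adjs) := by
      refine List.filter_congr ?_
      intro e _
      by_cases hcs : e.1 ∈ seeds
      · simp [bTier, hcs]
      · by_cases hb : e.1 ∈ ohB <;> simp [bTier, hcs, hb]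
    have e1eq : List.filter (fun e => PySem.Set.contains ohA e.1) (pvAllE adjs) =
        List.filter (fun e => bTier seeds ohB e.1 == 1) (pvAllE adjs) := by
      refine List.filter_congr ?_
      intro e _
      by_cases ha : e.1 ∈ ohA
      · have hseedf : e.1 ∉ seeds := by
          have := hAseed e.1 ((PySem.Set.contains_iff _ _).mpr ha)
          simpa using this
        have hb : e.1 ∈ ohB := (hiff e.1).mp ha
        simp [bTier, ha, hb, hseedf]
      · have hb : e.1 ∉ ohB := fun hx => ha ((hiff e.1).mpr hx)
        by_cases hcs : e.1 ∈ seeds <;> simp [bTier, ha, hb, hcs]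
    rw [e0eq, e1eq, pvDedup_append, pvDedup_append]
    -- the set used to dedup tier 1 can be shrunk back to S
    have d1eq : pvDedup (PySem.Set.update S (List.filter (fun e => bTier seeds ohB e.1 == 0) (pvAllE adjs)))
        (List.filter (fun e => bTier seeds ohB e.1 == 1) (pvAllE adjs)) =
        pvDedup S (List.filter (fun e => bTier seeds ohB e.1 == 1) (pvAllE adjs)) := by
      refine pvDedup_congr _ _ _ ?_
      intro e he
      have ht1 : bTier seeds ohB e.1 = 1 := by
        have := (List.mem_filter.mp he).2
        simpa using this
      rw [PySem.Set.mem_update]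
      constructor
      · rintro (h | h)
        · exact h
        · have := (List.mem_filter.mp h).2
          simp [ht1] at this
      · exact Or.inl
    -- the third scan against the accumulated set is the tier-2 dedup
    have d2eq : pvDedup
        (PySem.Set.update (PySem.Set.update S (List.filter (fun e => bTier seeds ohB e.1 == 0) (pvAllE adjs)))
          (List.filter (fun e => bTier seeds ohB e.1 == 1) (pvAllE adjs)))
        (pvAllE adjs) =
        pvDedup S ((pvAllE adjs).filter (fun e => !(bTier seeds ohB e.1 == 0) && !(bTier seeds ohB e.1 == 1))) := by
      refine pvDedup_filter _ _ _ _ ?_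
      intro e heAE
      constructor
      · intro hp
        have : bTier seeds ohB e.1 = 0 ∨ bTier seeds ohB e.1 = 1 := by
          by_cases h0 : bTier seeds ohB e.1 = 0
          · exact Or.inl h0
          · by_cases h1 : bTier seeds ohB e.1 = 1
            · exact Or.inr h1
            · simp [h0, h1] at hp
        rw [PySem.Set.mem_update, PySem.Set.mem_update]
        rcases this with h0 | h1
        · exact Or.inl (Or.inr (List.mem_filter.mpr ⟨heAE, by simp [h0]⟩))
        · exact Or.inr (List.mem_filter.mpr ⟨heAE, by simp [h1]⟩)
      · intro hp
        have hn : ¬ (bTier seeds ohB e.1 = 0) ∧ ¬ (bTier seeds ohB e.1 = 1) := by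
          constructor <;> intro hx <;> simp [hx] at hp
        rw [PySem.Set.mem_update, PySem.Set.mem_update]
        constructor
        · rintro ((h | h) | h)
          · exact h
          · have := (List.mem_filter.mp h).2
            simp [hn.1] at this
          · have := (List.mem_filter.mp h).2
            simp [hn.2] at this
        · exact fun h => Or.inl (Or.inl h)
    rw [d1eq, d2eq]
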